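-- pv_equiv track=rewrite | github.com/AaronAikman/MiscScripts | ProjectEuler/ProjectEulerUtils.py | find_multiples
-- ===== SOURCE A (Python) =====
-- def find_multiples(possible_multiples, ceiling):
--     found_multiples = []
--     for i in range(ceiling):
--         found_some = False
--         for multip in possible_multiples:
--
--             if i % multip == 0:
--                 found_some = True
--         if found_some:
--             found_multiples.append(i)
--     return found_multiples
-- ===== SOURCE B (Python) =====
-- def find_multiples(possible_multiples, ceiling):
--     # Sieve: mark the multiples of each divisor once, then collect the marked
--     # numbers in ascending order.  O(ceiling + sum(ceiling/|m|)) instead of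
--     # A's O(ceiling * len(possible_multiples)).
--     n = ceiling if ceiling > 0 else 0
--     sieve = [False] * n
--     for m in possible_multiples:
--         if m != 0:
--             step = -m if m < 0 else m
--             for j in range(0, n, step):
--                 sieve[j] = True
--     return [i for i in range(n) if sieve[i]]
-- ===== Notes on version B (the rewrite author's own statement) =====
-- stated objective: faster
-- what changed: Replaces A's per-number scan over all divisors (i % m for every i below ceiling and every m) by a sieve that marks the multiples of each nonzero divisor once in a boolean array and then collects the marked numbers in ascending order.
-- crash fix: When 0 is among possible_multiples and ceiling > 0, A raises ZeroDivisionError on 0 % 0; B's sieve skips the divisor 0 and returns the multiples of the remaining divisors (Raises_ is bounded to ceiling <= 10^6, where B's sieve and result fit in memory). — e.g. on find_multiples([0, 2], 5): A raises ZeroDivisionError, B returns [0, 2, 4]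
import Mathlib
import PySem

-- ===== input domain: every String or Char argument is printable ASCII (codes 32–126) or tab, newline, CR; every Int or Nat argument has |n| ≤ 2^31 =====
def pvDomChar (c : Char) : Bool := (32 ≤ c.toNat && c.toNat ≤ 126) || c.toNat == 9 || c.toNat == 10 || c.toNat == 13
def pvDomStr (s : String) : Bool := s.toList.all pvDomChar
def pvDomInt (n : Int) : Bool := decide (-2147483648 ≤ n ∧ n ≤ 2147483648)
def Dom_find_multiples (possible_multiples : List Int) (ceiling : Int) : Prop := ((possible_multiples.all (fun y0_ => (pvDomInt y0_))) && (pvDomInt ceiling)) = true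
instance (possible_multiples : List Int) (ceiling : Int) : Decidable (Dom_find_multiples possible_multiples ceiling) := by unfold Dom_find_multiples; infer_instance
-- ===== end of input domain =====

-- B replaces A's per-number scan over all divisors by a sieve (mark the multiples of
-- each divisor once, then collect the marked numbers in ascending order); objective: faster.

-- ===== PORT A =====
def find_multiples (possible_multiples : List Int) (ceiling : Int) : List Int :=
  (PySem.List.pyRange 0 ceiling 1).foldl (fun found_multiples i =>
    let found_some :=
      possible_multiples.foldl (fun fs multip =>
        if PySem.Int.mod i multip = 0 then true else fs) false
    if found_some then found_multiples ++ [i] else found_multiples) []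

-- ===== PORT B =====
def find_multiples_alt (possible_multiples : List Int) (ceiling : Int) : List Int :=
  let n : Int := if 0 < ceiling then ceiling else 0
  let sieve0 : List Bool := List.replicate n.toNat false
  let sieve :=
    possible_multiples.foldl (fun s m =>
      if m ≠ 0 then
        -- sieve[j] = True for j in range(0, n, step): j is in range, so List.set is exact
        (PySem.List.pyRange 0 n (if m < 0 then -m else m)).foldl
          (fun s j => s.set j.toNat true) s
      else s) sieve0
  -- [i for i in range(n) if sieve[i]]: i.toNat < sieve.length, so getD is the exact sieve[i]
  (PySem.List.pyRange 0 n 1).filter (fun i => sieve.getD i.toNat false)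

-- ===== PRECONDITION & SPEC =====
-- Pre_ excludes exactly the inputs where A raises ZeroDivisionError (0 among the
-- multiples while the range is nonempty); A returns on every other input.
def Pre_find_multiples (possible_multiples : List Int) (ceiling : Int) : Prop :=
  ¬ ((0 : Int) ∈ possible_multiples ∧ 0 < ceiling)
instance (possible_multiples : List Int) (ceiling : Int) : Decidable (Pre_find_multiples possible_multiples ceiling) := by unfold Pre_find_multiples; infer_instance
def pvWitness_find_multiples : List Int × Int := ([3, 5], 16)

-- A raises ZeroDivisionError whenever 0 is among possible_multiples and ceiling > 0; B's sieve skips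
-- the divisor 0 and returns the multiples of the remaining divisors (region bounded to ceilings whose
-- sieve/result fit in memory, so B really returns there).
def Raises_find_multiples (possible_multiples : List Int) (ceiling : Int) : Prop :=
  (0 : Int) ∈ possible_multiples ∧ 0 < ceiling ∧ ceiling ≤ 1000000
instance (possible_multiples : List Int) (ceiling : Int) : Decidable (Raises_find_multiples possible_multiples ceiling) := by unfold Raises_find_multiples; infer_instance
def pvRaiseWitness_find_multiples : List Int × Int := ([0, 2], 5)
def pvRaiseWitnessOut_find_multiples : List Int := [0, 2, 4]

def Spec_find_multiples (possible_multiples : List Int) (ceiling : Int) (out : List Int) : Prop := out = find_multiples_alt possible_multiples ceiling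
instance (possible_multiples : List Int) (ceiling : Int) (out : List Int) : Decidable (Spec_find_multiples possible_multiples ceiling out) := by unfold Spec_find_multiples; infer_instance

-- ===== CLAIM (what is proved, stated in full; the proofs are below) =====
def Claim_equal_find_multiples : Prop := ∀ (possible_multiples : List Int) (ceiling : Int), Dom_find_multiples possible_multiples ceiling → Pre_find_multiples possible_multiples ceiling → Spec_find_multiples possible_multiples ceiling (find_multiples possible_multiples ceiling)
def Claim_raises_find_multiples : Prop := (∀ (possible_multiples : List Int) (ceiling : Int), Dom_find_multiples possible_multiples ceiling → Raises_find_multiples possible_multiples ceiling → ¬ Pre_find_multiples possible_multiples ceiling) ∧ (Dom_find_multiples (pvRaiseWitness_find_multiples.1) (pvRaiseWitness_find_multiples.2) ∧ Raises_find_multiples (pvRaiseWitness_find_multiples.1) (pvRaiseWitness_find_multiples.2) ∧ find_multiples_alt (pvRaiseWitness_find_multiples.1) (pvRaiseWitness_find_multiples.2) = pvRaiseWitnessOut_find_multiples)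

-- ===== LEMMAS AND PROOFS =====

-- A's inner loop over the divisors is an 'any'
lemma inner_any (i : Int) (pm : List Int) (b : Bool) :
    pm.foldl (fun fs multip => if PySem.Int.mod i multip = 0 then true else fs) b
      = (b || pm.any (fun m => decide (PySem.Int.mod i m = 0))) := by
  induction pm generalizing b with
  | nil => simp
  | cons m t ih =>
    simp only [List.foldl_cons, List.any_cons]
    rw [ih]
    by_cases h : PySem.Int.mod i m = 0 <;> simp [h]

-- one sieve write, read back
lemma getD_set (s : List Bool) (j k : Nat) :
    (s.set j true).getD k false
      = if j = k ∧ k < s.length then true else s.getD k false := by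
  simp only [List.getD_eq_getElem?_getD, List.getElem?_set]
  split_ifs with h h1 h2 h3 <;> simp_all

-- one divisor's marking pass, read back
lemma getD_mark (L : List Int) (s : List Bool) (k : Nat) :
    ((L.foldl (fun s j => s.set j.toNat true) s).getD k false)
      = (s.getD k false || L.any (fun j => decide (j.toNat = k ∧ k < s.length))) := by
  induction L generalizing s with
  | nil => simp
  | cons j t ih =>
    simp only [List.foldl_cons, List.any_cons]
    rw [ih, getD_set]
    simp only [List.length_set]
    by_cases h : j.toNat = k ∧ k < s.length <;> simp [h]

-- the whole sieve-building loop, read back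
lemma getD_sieve (pm : List Int) (n : Int) (s : List Bool) (k : Nat) :
    ((pm.foldl (fun s m =>
        if m ≠ 0 then
          (PySem.List.pyRange 0 n (if m < 0 then -m else m)).foldl
            (fun s j => s.set j.toNat true) s
        else s) s).getD k false)
      = (s.getD k false ||
          pm.any (fun m => decide (m ≠ 0) &&
            (PySem.List.pyRange 0 n (if m < 0 then -m else m)).any
              (fun j => decide (j.toNat = k ∧ k < s.length)))) := by
  induction pm generalizing s with
  | nil => simp
  | cons m t ih =>
    simp only [List.foldl_cons, List.any_cons]
    by_cases hm : m ≠ 0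
    · rw [if_pos hm, ih, getD_mark]
      have hlen : ((PySem.List.pyRange 0 n (if m < 0 then -m else m)).foldl
          (fun s j => s.set j.toNat true) s).length = s.length := by
        induction (PySem.List.pyRange 0 n (if m < 0 then -m else m)) generalizing s with
        | nil => rfl
        | cons j t ih2 => simp [List.foldl_cons, ih2, List.length_set]
      rw [hlen]
      simp [hm, Bool.or_assoc]
    · rw [if_neg hm, ih]
      simp at hm
      simp [hm]

-- the two membership tests agree on every i of the range, when 0 is not a divisor
lemma pred_eq (pm : List Int) (n i : Int) (h0 : (0 : Int) ∉ pm)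
    (hi : 0 ≤ i) (hin : i < n) :
    (pm.any (fun m => decide (PySem.Int.mod i m = 0)))
      = (pm.any (fun m => decide (m ≠ 0) &&
          (PySem.List.pyRange 0 n (if m < 0 then -m else m)).any
            (fun j => decide (j.toNat = i.toNat ∧ i.toNat < n.toNat)))) := by
  apply PySem.List.any_congr_mem
  intro m hm
  have hm0 : m ≠ 0 := fun h => h0 (h ▸ hm)
  have hstep : (0 : Int) < (if m < 0 then -m else m) := by
    split_ifs with h <;> omega
  have hdvd : (if m < 0 then -m else m) ∣ i ↔ m ∣ i := by
    split_ifs with h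
    · exact neg_dvd
    · exact Iff.rfl
  simp only [ne_eq, hm0, not_false_eq_true, decide_true, Bool.true_and]
  rw [Bool.eq_iff_iff]
  simp only [decide_eq_true_eq, List.any_eq_true, PySem.List.mem_pyRange_iff_of_pos hstep]
  constructor
  · intro hmod
    refine ⟨i, ⟨hi, hin, by simpa using hdvd.mpr ((PySem.Int.mod_eq_zero_iff_dvd i m).mp hmod)⟩,
      rfl, by omega⟩
  · rintro ⟨j, ⟨hj0, hjn, hjd⟩, hjk, -⟩
    have hji : j = i := by omega
    rw [hji] at hjd
    exact (PySem.Int.mod_eq_zero_iff_dvd i m).mpr (hdvd.mp (by simpa using hjd))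
-- ===== VERDICT (by name: the statement is the Claim_ definition above) =====
theorem find_multiples_spec : Claim_equal_find_multiples := by
  intro pm c _ hpre
  unfold Spec_find_multiples find_multiples find_multiples_alt
  by_cases hc : 0 < c
  · have h0 : (0 : Int) ∉ pm := fun h => hpre ⟨h, hc⟩
    rw [if_pos hc]
    rw [PySem.List.foldl_congr_mem _ _
      (fun acc i => if pm.any (fun m => decide (PySem.Int.mod i m = 0)) then acc ++ [i] else acc)
      _ (by intro acc i _; simp only [inner_any, Bool.false_or])]
    rw [PySem.List.foldl_append_if_eq_filter]
    simp only [List.nil_append]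
    apply List.filter_congr
    intro i hi
    rw [PySem.List.mem_pyRange_one] at hi
    rw [getD_sieve]
    simp only [List.getD_eq_getElem?_getD, List.getElem?_replicate, List.length_replicate]
    rw [pred_eq pm c i h0 hi.1 hi.2]
    split_ifs with h <;> simp
  · rw [if_neg hc]
    rw [PySem.List.pyRange_one_eq_nil (show c ≤ 0 by omega)]
    simp [PySem.List.pyRange_one_eq_nil (le_refl (0 : Int))]

def find_multiples_raises : Claim_raises_find_multiples :=
  ⟨fun _ _ _ hr hp => hp ⟨hr.1, hr.2.1⟩, by decide⟩
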